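-- pv_equiv track=rewrite | github.com/peachnuts/Multiprogramming | src/tools/submit.py | pauli_measure_multiprogram
-- ===== SOURCE A (Python) =====
-- def pauli_measure_multiprogram(counts, start, end):
--     result_00, result_01, result_10, result_11 = 0, 0, 0, 0
--     for result, count in counts.items():
--         if result[start:end] == "00":
--             result_00 += count
--         elif result[start:end] == "01":
--             result_01 += count
--         elif result[start:end] == "10":
--             result_10 += count
--         elif result[start:end] == "11":
--             result_11 += count
--     return result_00, result_01, result_10, result_11
-- ===== SOURCE B (Python) =====
-- def pauli_measure_multiprogram(counts, start, end):
--     def total(key):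
--         return sum(count for result, count in counts.items()
--                    if result[start:end] == key)
--     return total("00"), total("01"), total("10"), total("11")
-- ===== Notes on version B (the rewrite author's own statement) =====
-- stated objective: simpler
-- what changed: Replaces A's single stateful pass with four named accumulators and an if/elif chain by four independent staged passes, each bucket computed directly as sum() of a filtered comprehension with no mutable state at all.
import Mathlib
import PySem

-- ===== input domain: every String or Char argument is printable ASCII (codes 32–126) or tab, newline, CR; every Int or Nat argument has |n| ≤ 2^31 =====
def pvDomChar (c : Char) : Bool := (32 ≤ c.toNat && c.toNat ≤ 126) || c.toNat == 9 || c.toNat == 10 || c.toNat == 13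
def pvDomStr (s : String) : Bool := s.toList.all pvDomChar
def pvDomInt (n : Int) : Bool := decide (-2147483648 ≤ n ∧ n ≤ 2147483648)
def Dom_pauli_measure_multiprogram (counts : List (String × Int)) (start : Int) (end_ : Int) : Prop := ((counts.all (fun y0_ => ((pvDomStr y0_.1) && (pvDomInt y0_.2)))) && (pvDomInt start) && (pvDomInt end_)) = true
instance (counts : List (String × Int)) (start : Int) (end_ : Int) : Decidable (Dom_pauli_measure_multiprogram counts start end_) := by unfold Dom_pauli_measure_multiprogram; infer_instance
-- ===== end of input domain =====

-- B drops A's single stateful pass (four named accumulators, if/elif chain) and instead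
-- computes each bucket independently as sum() of a filtered comprehension (objective: simpler).

-- ===== PORT A =====
-- one loop iteration of A: the if/elif chain over the four named accumulators
def pvStepA (start end_ : Int) (acc : Int × Int × Int × Int) (p : String × Int) : Int × Int × Int × Int :=
  let key := PySem.Str.slice p.1 (some start) (some end_)
  if key = "00" then (acc.1 + p.2, acc.2.1, acc.2.2.1, acc.2.2.2)
  else if key = "01" then (acc.1, acc.2.1 + p.2, acc.2.2.1, acc.2.2.2)
  else if key = "10" then (acc.1, acc.2.1, acc.2.2.1 + p.2, acc.2.2.2)
  else if key = "11" then (acc.1, acc.2.1, acc.2.2.1, acc.2.2.2 + p.2)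
  else acc

def pauli_measure_multiprogram (counts : List (String × Int)) (start : Int) (end_ : Int) : Int × Int × Int × Int :=
  -- 'for result, count in counts.items()': the dict's items (duplicate keys overwrite)
  ((PySem.Dict.ofList counts).items).foldl (pvStepA start end_) (0, 0, 0, 0)

-- ===== PORT B =====
-- helper 'total(key)': sum(count for result, count in counts.items() if result[start:end] == key)
def pvTotal (counts : List (String × Int)) (start end_ : Int) (key : String) : Int :=
  ((((PySem.Dict.ofList counts).items).filter
      (fun p => PySem.Str.slice p.1 (some start) (some end_) == key)).map (·.2)).sum

def pauli_measure_multiprogram_alt (counts : List (String × Int)) (start : Int) (end_ : Int) : Int × Int × Int × Int :=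
  (pvTotal counts start end_ "00", pvTotal counts start end_ "01",
   pvTotal counts start end_ "10", pvTotal counts start end_ "11")

-- ===== PRECONDITION & SPEC =====
def Spec_pauli_measure_multiprogram (counts : List (String × Int)) (start : Int) (end_ : Int) (out : Int × Int × Int × Int) : Prop := out = pauli_measure_multiprogram_alt counts start end_
instance (counts : List (String × Int)) (start : Int) (end_ : Int) (out : Int × Int × Int × Int) : Decidable (Spec_pauli_measure_multiprogram counts start end_ out) := by unfold Spec_pauli_measure_multiprogram; infer_instance

-- ===== CLAIM (what is proved, stated in full; the proofs are below) =====
def Claim_equal_pauli_measure_multiprogram : Prop := ∀ (counts : List (String × Int)) (start : Int) (end_ : Int), Dom_pauli_measure_multiprogram counts start end_ → Spec_pauli_measure_multiprogram counts start end_ (pauli_measure_multiprogram counts start end_)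

-- ===== LEMMAS AND PROOFS =====
-- total count of pairs whose slice equals k, over an arbitrary pair list
def pvSum (start end_ : Int) (ys : List (String × Int)) (k : String) : Int :=
  ((ys.filter (fun p => PySem.Str.slice p.1 (some start) (some end_) == k)).map (·.2)).sum

theorem pvSum_cons (start end_ : Int) (p : String × Int) (ys : List (String × Int)) (k : String) :
    pvSum start end_ (p :: ys) k =
      (if PySem.Str.slice p.1 (some start) (some end_) = k then p.2 else 0) + pvSum start end_ ys k := by
  simp [pvSum, List.filter_cons]
  split_ifs with h <;> simp_all

theorem pvLoopA (start end_ : Int) (ys : List (String × Int)) :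
    ∀ a b c e : Int, ys.foldl (pvStepA start end_) (a, b, c, e) =
      (a + pvSum start end_ ys "00", b + pvSum start end_ ys "01",
       c + pvSum start end_ ys "10", e + pvSum start end_ ys "11") := by
  induction ys with
  | nil => intro a b c e; simp [pvSum]
  | cons p ys ih =>
    intro a b c e
    simp only [List.foldl_cons, pvStepA]
    rw [pvSum_cons, pvSum_cons, pvSum_cons, pvSum_cons]
    split_ifs with h1 h2 h3 h4 <;> rw [ih] <;> simp_all <;> ring_nf

-- ===== VERDICT (by name: the statement is the Claim_ definition above) =====
theorem pauli_measure_multiprogram_spec : Claim_equal_pauli_measure_multiprogram := by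
  intro counts start end_ _
  unfold Spec_pauli_measure_multiprogram pauli_measure_multiprogram pauli_measure_multiprogram_alt
  rw [pvLoopA]
  simp [pvTotal, pvSum]
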